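-- pv_equiv track=rewrite | github.com/ALazenka/LocalHackDay-Project | backend/src/algorithm.py | find_most_unique
-- ===== SOURCE A (Python) =====
-- def find_most_unique(d):
-- 	'''Unique and lowest slices'''
-- 	toppings = list(d.keys())
--
-- 	result = {}
--
-- 	for x in toppings:
-- 		result[x] = 0
--
-- 	#most unique&picky
-- 	for i in range(0,len(toppings)):
-- 		for j in range(0, len(toppings)):
-- 				result[toppings[i]] += num_matches(toppings[i], toppings[j])
--
-- 	lowest_matches = min(result.values())
--
-- 	lowest_slices = (0, 99999999999999999999999999)
--
-- 	#lowest num of slices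
-- 	for i in result.keys():
-- 		if result[i] == lowest_matches and d[i] < lowest_slices[1]:
-- 			lowest_slices = (i, d[i])
--
-- 	return lowest_slices[0]
--
-- def num_matches(t1, t2):
-- 	count = 0
-- 	for i in range(len(t1)):
-- 		if t1[i] == 1 and t2[i] == 1:
-- 			count += 1
-- 	return count
-- ===== SOURCE B (Python) =====
-- def find_most_unique(d):
--     '''Unique and lowest slices'''
--     keys = list(d)
--     L = max(len(k) for k in keys)
--     col = [sum(p < len(k) and k[p] == 1 for k in keys) for p in range(L)]
--     def score(k):
--         return sum(col[p] for p in range(len(k)) if k[p] == 1)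
--     return min(keys, key=lambda k: (score(k), d[k]))
-- ===== Notes on version B (the rewrite author's own statement) =====
-- stated objective: faster
-- what changed: Replaces the O(n^2*L) all-pairs num_matches accumulation and the two-phase min scan by per-position column counts (match total of a key = sum of column counts at its 1-positions) and a single min with a (matches, slices) tuple key, O(n*L).
import Mathlib
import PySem

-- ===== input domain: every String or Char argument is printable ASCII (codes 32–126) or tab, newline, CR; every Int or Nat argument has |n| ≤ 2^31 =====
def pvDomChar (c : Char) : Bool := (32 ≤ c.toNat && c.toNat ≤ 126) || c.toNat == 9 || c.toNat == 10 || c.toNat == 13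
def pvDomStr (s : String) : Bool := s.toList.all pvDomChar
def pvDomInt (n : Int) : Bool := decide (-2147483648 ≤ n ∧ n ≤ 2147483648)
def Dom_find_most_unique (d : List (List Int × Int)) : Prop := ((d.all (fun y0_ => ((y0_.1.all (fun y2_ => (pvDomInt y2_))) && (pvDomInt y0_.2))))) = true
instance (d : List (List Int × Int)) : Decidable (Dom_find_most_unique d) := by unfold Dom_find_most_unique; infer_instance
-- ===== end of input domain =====

-- B replaces A's O(n^2*L) all-pairs match accumulation by per-position column counts and a single
-- keyed min, O(n*L) (measured faster on large inputs in a timing run).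

-- ===== PORT A =====
def num_matches (t1 t2 : List Int) : Int :=
  -- for i in range(len(t1)): if t1[i] == 1 and t2[i] == 1: count += 1
  -- t1[i] is always in range; t2[i] can raise IndexError in Python (pyGetD's default is only
  -- reached outside Pre_find_most_unique, which excludes exactly those inputs).
  (PySem.List.pyRange 0 (PySem.List.len t1)).foldl
    (fun count i =>
      if PySem.List.pyGetD t1 i 0 = 1 ∧ PySem.List.pyGetD t2 i 0 = 1 then count + 1 else count) 0

def find_most_unique (d : List (List Int × Int)) : List Int :=
  let dd := PySem.Dict.mk d
  let toppings := dd.keys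
  let result1 : PySem.Dict (List Int) Int :=
    toppings.foldl (fun r x => r.insert x 0) PySem.Dict.empty
  -- result[toppings[i]] += num_matches(...): the key is always present, so 'modify _ 0' is exact
  let result2 :=
    (PySem.List.pyRange 0 (PySem.List.len toppings)).foldl (fun r i =>
      (PySem.List.pyRange 0 (PySem.List.len toppings)).foldl (fun r j =>
        r.modify (PySem.List.pyGetD toppings i []) 0
          (fun c => c + num_matches (PySem.List.pyGetD toppings i []) (PySem.List.pyGetD toppings j []))) r)
      result1
  -- min(result.values()): raises ValueError on an empty dict, excluded by Pre_
  let lowest_matches := (PySem.List.min? result2.values (fun v => v)).getD 0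
  -- Python's sentinel pair is (0, 99999999999999999999999999); its first component (the int 0) is
  -- never returned on Dom ∩ Pre_ (every slice count is far below the sentinel), [] stands in for it.
  let lowest_slices :=
    result2.keys.foldl (fun ls i =>
      if result2.getD i 0 = lowest_matches ∧ dd.getD i 0 < ls.2 then (i, dd.getD i 0) else ls)
      (([] : List Int), (99999999999999999999999999 : Int))
  lowest_slices.1

-- ===== PORT B =====
def find_most_unique_alt (d : List (List Int × Int)) : List Int :=
  let dd := PySem.Dict.mk d
  let keys := dd.keys
  -- L = max(len(k) for k in keys): ValueError on an empty dict, excluded by Pre_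
  let L := (PySem.List.max? (keys.map (fun k => PySem.List.len k)) (fun x => x)).getD 0
  -- col = [sum(p < len(k) and k[p] == 1 for k in keys) for p in range(L)]
  let col := (PySem.List.pyRange 0 L).map (fun p =>
      ((keys.countP (fun k => decide (p < PySem.List.len k) && (PySem.List.pyGetD k p 0 == 1))) : Int))
  -- score(k) = sum(col[p] for p in range(len(k)) if k[p] == 1)
  let score := fun (k : List Int) =>
      (((PySem.List.pyRange 0 (PySem.List.len k)).filter (fun p => PySem.List.pyGetD k p 0 == 1)).map
        (fun p => PySem.List.pyGetD col p 0)).sum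
  -- min(keys, key=lambda k: (score(k), d[k]))
  (PySem.List.min2? keys score (fun k => dd.getD k 0)).getD []

-- ===== PRECONDITION & SPEC =====
-- Pre_ excludes exactly the inputs on which the Python A raises: the empty dict (ValueError in min)
-- and dicts where some key has a 1 at a position not smaller than another key's length (IndexError
-- in num_matches); the Nodup conjunct is the Python-dict invariant (keys are unique).
def Pre_find_most_unique (d : List (List Int × Int)) : Prop :=
  d ≠ [] ∧ (d.map Prod.fst).Nodup ∧
  ∀ p ∈ d, ∀ q ∈ d, ∀ i : Nat, i < p.1.length → p.1.getD i 0 = 1 → i < q.1.length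
instance (d : List (List Int × Int)) : Decidable (Pre_find_most_unique d) := by
  unfold Pre_find_most_unique; infer_instance

def pvWitness_find_most_unique : (List (List Int × Int)) := [([1, 0], 3), ([0, 1], 2)]

def Spec_find_most_unique (d : List (List Int × Int)) (out : List Int) : Prop := out = find_most_unique_alt d
instance (d : List (List Int × Int)) (out : List Int) : Decidable (Spec_find_most_unique d out) := by
  unfold Spec_find_most_unique; infer_instance

-- ===== CLAIM (what is proved, stated in full; the proofs are below) =====
def Claim_equal_find_most_unique : Prop := ∀ (d : List (List Int × Int)), Dom_find_most_unique d → Pre_find_most_unique d → Spec_find_most_unique d (find_most_unique d)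

-- ===== LEMMAS AND PROOFS =====

theorem nm_eq_countP (t1 t2 : List Int) :
    num_matches t1 t2 =
      ((List.range t1.length).countP (fun i => (t1.getD i 0 == 1) && (t2.getD i 0 == 1)) : Int) := by
  unfold num_matches
  have hlen : PySem.List.len t1 = (t1.length : Int) := by simp [PySem.List.len]
  rw [hlen, PySem.List.pyRange_zero_natCast, List.foldl_map,
    PySem.List.foldl_ite_add_one (fun i : Nat => PySem.List.pyGetD t1 (i:Int) 0 = 1 ∧ PySem.List.pyGetD t2 (i:Int) 0 = 1)]
  rw [zero_add]
  congr 1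
  apply List.countP_congr
  intro x _
  simp [PySem.List.pyGetD_natCast, decide_eq_true_eq, Bool.and_eq_true, beq_iff_eq]

theorem countP_range_extend (a L : Nat) (h : a ≤ L) (p : Nat → Bool)
    (hp : ∀ i, a ≤ i → p i = false) :
    (List.range a).countP p = (List.range L).countP p := by
  have hL : L = a + (L - a) := (Nat.add_sub_cancel' h).symm
  rw [hL, List.range_add, List.countP_append]
  have : (List.countP p ((List.range (L - a)).map (a + ·))) = 0 := by
    rw [List.countP_eq_zero]
    intro x hx
    obtain ⟨i, _, rfl⟩ := List.mem_map.mp hx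
    simp [hp _ (Nat.le_add_right a i)]
  omega

theorem filter_range_extend (a L : Nat) (h : a ≤ L) (p : Nat → Bool)
    (hp : ∀ i, a ≤ i → p i = false) :
    (List.range a).filter p = (List.range L).filter p := by
  have hL : L = a + (L - a) := (Nat.add_sub_cancel' h).symm
  rw [hL, List.range_add, List.filter_append]
  have : ((List.range (L - a)).map (a + ·)).filter p = [] := by
    rw [List.filter_eq_nil_iff]
    intro x hx
    obtain ⟨i, _, rfl⟩ := List.mem_map.mp hx
    simp [hp _ (Nat.le_add_right a i)]
  rw [this, List.append_nil]

theorem sum_swap_count (ks : List (List Int)) (k : List Int) (L : Nat) :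
    (ks.map (fun k' =>
        (((List.range L).countP (fun i => (k.getD i 0 == 1) && (k'.getD i 0 == 1))) : Int))).sum
      = (((List.range L).filter (fun p => k.getD p 0 == 1)).map
          (fun p => ((ks.countP (fun k' => k'.getD p 0 == 1)) : Int))).sum := by
  induction ks with
  | nil => simp
  | cons k' ks ih =>
    rw [List.map_cons, List.sum_cons, ih]
    simp only [List.countP_cons]
    push_cast
    rw [PySem.List.sum_map_add_int, PySem.List.sum_map_ite_one_zero]
    rw [List.countP_filter]
    have : (List.countP (fun a => (k'.getD a 0 == 1) && (k.getD a 0 == 1)) (List.range L))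
        = (List.countP (fun i => (k.getD i 0 == 1) && (k'.getD i 0 == 1)) (List.range L)) := by
      apply List.countP_congr
      intro x _
      rw [Bool.and_comm]
    rw [this]
    ring

theorem getD_inner_fold (x v : List Int) (l : List (List Int)) (r : PySem.Dict (List Int) Int) :
    ((l.foldl (fun r y => r.modify x 0 (fun c => c + num_matches x y)) r).getD v 0)
      = r.getD v 0 + (if v = x then (l.map (num_matches x)).sum else 0) := by
  induction l generalizing r with
  | nil => simp
  | cons y l ih =>
    rw [List.foldl_cons, ih, PySem.Dict.getD_modify]
    split_ifs with h1
    · subst h1; simp [List.sum_cons]; ring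
    · simp

theorem getD_outer_fold (t l : List (List Int)) (r : PySem.Dict (List Int) Int) (v : List Int) :
    ((l.foldl (fun r x => t.foldl (fun r y => r.modify x 0 (fun c => c + num_matches x y)) r) r).getD v 0)
      = r.getD v 0 + ((l.filter (fun x => v == x)).map (fun x => (t.map (num_matches x)).sum)).sum := by
  induction l generalizing r with
  | nil => simp
  | cons x l ih =>
    rw [List.foldl_cons, ih, getD_inner_fold]
    rw [List.filter_cons]
    by_cases h : v = x
    · simp [h]
      ring
    · simp [h, beq_iff_eq]

theorem getD_insert_zero_fold (l : List (List Int)) (r : PySem.Dict (List Int) Int) (v : List Int) :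
    ((l.foldl (fun r x => r.insert x 0) r).getD v 0) = if v ∈ l then 0 else r.getD v 0 := by
  induction l generalizing r with
  | nil => simp
  | cons x l ih =>
    rw [List.foldl_cons, ih, PySem.Dict.getD_insert]
    by_cases h : v ∈ l
    · simp [h]
    · by_cases h2 : v = x <;> simp [h, h2]

theorem set_update_of_mem (l : List (List Int)) (s : PySem.Set (List Int))
    (h : ∀ x ∈ l, x ∈ s) : PySem.Set.update s l = s := by
  induction l generalizing s with
  | nil => rfl
  | cons x l ih =>
    have hx : PySem.Set.add s x = s := by
      simp [PySem.Set.add, PySem.Set.contains, h x (List.mem_cons_self ..)]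
    show PySem.Set.update (PySem.Set.add s x) l = s
    rw [hx]
    exact ih s (fun y hy => h y (List.mem_cons_of_mem _ hy))

theorem keys_outer_fold (t l : List (List Int)) (r : PySem.Dict (List Int) Int)
    (h : ∀ x ∈ l, x ∈ r.keys) :
    (l.foldl (fun r x => t.foldl (fun r y => r.modify x 0 (fun c => c + num_matches x y)) r) r).keys
      = r.keys := by
  induction l generalizing r with
  | nil => rfl
  | cons x l ih =>
    rw [List.foldl_cons]
    have hstep : (t.foldl (fun r y => r.modify x 0 (fun c => c + num_matches x y)) r).keys = r.keys := by
      rw [PySem.Dict.keys_foldl_modify_key t (fun _ => x) 0 (fun _ y => (fun c => c + num_matches x y)) r]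
      apply set_update_of_mem
      intro y hy
      obtain ⟨_, _, rfl⟩ := List.mem_map.mp hy
      exact h x (List.mem_cons_self ..)
    rw [ih _ (fun y hy => by rw [hstep]; exact h y (List.mem_cons_of_mem _ hy)), hstep]

def selStepB (f g : List Int → Int) (acc : Option (List Int)) (x : List Int) : Option (List Int) :=
  match acc with
  | none => some x
  | some m => if (decide (f x < f m) || (!decide (f m < f x) && decide (g x < g m))) then some x else some m

theorem selStepB_some (f g : List Int → Int) (kb x : List Int) :
    selStepB f g (some kb) x
      = if (decide (f x < f kb) || (!decide (f kb < f x) && decide (g x < g kb))) then some x else some kb := rfl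

theorem sel_fold (f g : List Int → Int) (lm BIG : Int) (R : List (List Int))
    (hR : ∀ k ∈ R, lm ≤ f k ∧ g k < BIG) (aA : List Int × Int) (kb : List Int)
    (hb1 : lm ≤ f kb)
    (hA1 : f kb = lm → aA = (kb, g kb)) (hA2 : lm < f kb → aA = (([] : List Int), BIG)) :
    ∃ kb', (R.foldl (selStepB f g) (some kb)) = some kb' ∧ lm ≤ f kb' ∧
      (f kb' = lm →
        R.foldl (fun ls k => if f k = lm ∧ g k < ls.2 then (k, g k) else ls) aA = (kb', g kb')) ∧
      (lm < f kb' →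
        R.foldl (fun ls k => if f k = lm ∧ g k < ls.2 then (k, g k) else ls) aA = (([] : List Int), BIG)) := by
  induction R generalizing aA kb with
  | nil => exact ⟨kb, rfl, hb1, hA1, hA2⟩
  | cons k R ih =>
    obtain ⟨hk1, hk2⟩ := hR k (List.mem_cons_self ..)
    have hR' : ∀ x ∈ R, lm ≤ f x ∧ g x < BIG := fun x hx => hR x (List.mem_cons_of_mem _ hx)
    rw [List.foldl_cons, List.foldl_cons, selStepB_some]
    rcases lt_or_eq_of_le hb1 with hkb | hkb
    · -- lm < f kb, aA = ([], BIG)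
      rw [hA2 hkb]
      by_cases hfk : f k = lm
      · have ht : (decide (f k < f kb) || (!decide (f kb < f k) && decide (g k < g kb))) = true := by
          simp; omega
        rw [ht, if_pos rfl]
        have h2 : (if f k = lm ∧ g k < (([] : List Int), BIG).2 then (k, g k) else (([] : List Int), BIG)) = (k, g k) := by
          simp [hfk, hk2]
        rw [h2]
        exact ih hR' (k, g k) k hk1 (fun _ => rfl) (fun hc => absurd hfk (by omega))
      · have h2 : (if f k = lm ∧ g k < (([] : List Int), BIG).2 then (k, g k) else (([] : List Int), BIG)) = (([] : List Int), BIG) := by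
          simp [hfk]
        rw [h2]
        by_cases ht : (decide (f k < f kb) || (!decide (f kb < f k) && decide (g k < g kb))) = true
        · rw [ht, if_pos rfl]
          exact ih hR' _ k hk1 (fun hc => absurd hfk (by omega)) (fun _ => rfl)
        · rw [Bool.not_eq_true] at ht
          rw [ht, if_neg (by simp)]
          exact ih hR' _ kb hb1 (fun hc => absurd hc (by omega)) (fun _ => rfl)
    · -- f kb = lm, aA = (kb, g kb)
      rw [hA1 hkb.symm]
      by_cases hfk : f k = lm
      · by_cases hg : g k < g kb
        · have ht : (decide (f k < f kb) || (!decide (f kb < f k) && decide (g k < g kb))) = true := by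
            simp; omega
          rw [ht, if_pos rfl]
          have h2 : (if f k = lm ∧ g k < (kb, g kb).2 then (k, g k) else (kb, g kb)) = (k, g k) := by
            simp [hfk, hg]
          rw [h2]
          exact ih hR' _ k hk1 (fun _ => rfl) (fun hc => absurd hfk (by omega))
        · have ht : (decide (f k < f kb) || (!decide (f kb < f k) && decide (g k < g kb))) = false := by
            simp; omega
          rw [ht, if_neg (by simp)]
          have h2 : (if f k = lm ∧ g k < (kb, g kb).2 then (k, g k) else (kb, g kb)) = (kb, g kb) := by
            simp [hg]
          rw [h2]
          exact ih hR' _ kb hb1 (fun _ => rfl) (fun hc => absurd hkb.symm (by omega))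
      · have ht : (decide (f k < f kb) || (!decide (f kb < f k) && decide (g k < g kb))) = false := by
          simp; omega
        rw [ht, if_neg (by simp)]
        have h2 : (if f k = lm ∧ g k < (kb, g kb).2 then (k, g k) else (kb, g kb)) = (kb, g kb) := by
          simp [hfk]
        rw [h2]
        exact ih hR' _ kb hb1 (fun _ => rfl) (fun hc => absurd hkb.symm (by omega))

theorem selStepB_none (f g : List Int → Int) (x : List Int) : selStepB f g none x = some x := rfl

theorem min2?_eq_foldl_selStepB (xs : List (List Int)) (f g : List Int → Int) :
    PySem.List.min2? xs f g = xs.foldl (selStepB f g) none := by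
  unfold PySem.List.min2?
  congr 1
  funext acc x
  cases acc <;> rfl

theorem sel_fold_min (f g : List Int → Int) (R : List (List Int)) (kb kb' : List Int)
    (h : (R.foldl (selStepB f g) (some kb)) = some kb') :
    f kb' ≤ f kb ∧ ∀ y ∈ R, f kb' ≤ f y := by
  induction R generalizing kb with
  | nil => simp_all [List.foldl_nil]
  | cons k R ih =>
    rw [List.foldl_cons, selStepB_some] at h
    by_cases ht : (decide (f k < f kb) || (!decide (f kb < f k) && decide (g k < g kb))) = true
    · rw [ht, if_pos rfl] at h
      obtain ⟨h1, h2⟩ := ih k h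
      have hle : f k ≤ f kb := by
        simp at ht
        omega
      refine ⟨le_trans h1 hle, ?_⟩
      intro y hy
      rcases List.mem_cons.mp hy with rfl | hy
      · exact h1
      · exact h2 y hy
    · rw [Bool.not_eq_true] at ht
      rw [ht, if_neg (by simp)] at h
      obtain ⟨h1, h2⟩ := ih kb h
      have hle : f kb ≤ f k := by
        simp at ht
        omega
      refine ⟨h1, ?_⟩
      intro y hy
      rcases List.mem_cons.mp hy with rfl | hy
      · exact le_trans h1 hle
      · exact h2 y hy

theorem M_eq_score (T : List (List Int)) (LN : Nat) (k : List Int) (hk : k.length ≤ LN) :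
    (T.map (num_matches k)).sum
      = (((PySem.List.pyRange 0 (PySem.List.len k)).filter (fun p => PySem.List.pyGetD k p 0 == 1)).map
          (fun p => PySem.List.pyGetD ((PySem.List.pyRange 0 (LN : Int)).map (fun p =>
              ((T.countP (fun k' => decide (p < PySem.List.len k') && (PySem.List.pyGetD k' p 0 == 1))) : Int))) p 0)).sum := by
  have hlenk : PySem.List.len k = (k.length : Int) := by simp [PySem.List.len]
  rw [hlenk, PySem.List.pyRange_zero_natCast k.length, List.filter_map, List.map_map]
  have hfil : ((fun p : Int => PySem.List.pyGetD k p 0 == 1) ∘ (fun n : Nat => (n : Int)))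
      = (fun p : Nat => k.getD p 0 == 1) := by
    funext p
    simp [Function.comp, PySem.List.pyGetD_natCast]
  rw [hfil]
  have hoob : ∀ i, k.length ≤ i → (k.getD i 0 == 1) = false := by
    intro i hi
    simp [List.getD, List.getElem?_eq_none hi]
  rw [filter_range_extend k.length LN hk _ hoob]
  have hterm : ∀ k' ∈ T, num_matches k k'
      = (((List.range LN).countP (fun i => (k.getD i 0 == 1) && (k'.getD i 0 == 1))) : Int) := by
    intro k' _
    rw [nm_eq_countP, countP_range_extend k.length LN hk]
    intro i hi
    simp only [Bool.and_eq_false_iff]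
    left
    exact hoob i hi
  rw [List.map_congr_left hterm, sum_swap_count]
  apply congrArg List.sum
  apply List.map_congr_left
  intro p hp
  have hpLN : p < LN := List.mem_range.mp (List.mem_of_mem_filter hp)
  have : ((fun p : Int => PySem.List.pyGetD ((PySem.List.pyRange 0 (LN : Int)).map (fun p =>
      ((T.countP (fun k' => decide (p < PySem.List.len k') && (PySem.List.pyGetD k' p 0 == 1))) : Int))) p 0)
      ∘ (fun n : Nat => (n : Int))) p
      = PySem.List.pyGetD ((PySem.List.pyRange 0 (LN : Int)).map (fun p =>
      ((T.countP (fun k' => decide (p < PySem.List.len k') && (PySem.List.pyGetD k' p 0 == 1))) : Int))) (p : Int) 0 := rfl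
  rw [this, PySem.List.pyGetD_map_pyRange _ LN p 0 hpLN]
  congr 1
  apply List.countP_congr
  intro k' hk'
  by_cases h : p < k'.length
  · simp [PySem.List.pyGetD_natCast, PySem.List.len, h]
  · simp [PySem.List.pyGetD_natCast, PySem.List.len, h, List.getD]

-- ===== VERDICT (by name: the statement is the Claim_ definition above) =====
theorem find_most_unique_spec : Claim_equal_find_most_unique := by
  unfold Claim_equal_find_most_unique
  intro d hDom hPre
  obtain ⟨hne, hnd, -⟩ := hPre
  unfold Spec_find_most_unique find_most_unique find_most_unique_alt
  have hT : (PySem.Dict.mk d).keys = d.map Prod.fst := rfl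
  have hneT : d.map Prod.fst ≠ [] := by simpa using hne
  dsimp only
  rw [hT]
  set T := List.map Prod.fst d with hTdef
  set R1 := List.foldl (fun r x => PySem.Dict.insert r x 0) (PySem.Dict.empty : PySem.Dict (List Int) Int) T with hR1
  set R2 := List.foldl
      (fun r i =>
        List.foldl
          (fun r j =>
            PySem.Dict.modify r (PySem.List.pyGetD T i []) 0 fun c =>
              c + num_matches (PySem.List.pyGetD T i []) (PySem.List.pyGetD T j []))
          r (PySem.List.pyRange 0 (PySem.List.len T)))
      R1 (PySem.List.pyRange 0 (PySem.List.len T)) with hR2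
  have hconv : R2 = List.foldl (fun r x => List.foldl (fun r y => PySem.Dict.modify r x 0 (fun c => c + num_matches x y)) r T) R1 T := by
    rw [hR2]
    have hout := PySem.List.foldl_pyRange_pyGetD T ([] : List Int)
      (fun r x => List.foldl (fun r j => PySem.Dict.modify r x 0 (fun c => c + num_matches x (PySem.List.pyGetD T j []))) r (PySem.List.pyRange 0 (PySem.List.len T))) R1 (le_refl 0)
    simp only [Int.toNat_zero, List.drop_zero] at hout
    rw [hout]
    apply PySem.List.foldl_congr_mem
    intro acc x hx
    have hin := PySem.List.foldl_pyRange_pyGetD T ([] : List Int)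
      (fun r y => PySem.Dict.modify r x 0 (fun c => c + num_matches x y)) acc (le_refl 0)
    simp only [Int.toNat_zero, List.drop_zero] at hin
    exact hin
  obtain ⟨m, hM⟩ : ∃ m, PySem.List.max? (List.map (fun k => PySem.List.len k) T) (fun x => x) = some m := by
    cases h : PySem.List.max? (List.map (fun k => PySem.List.len k) T) (fun x => x) with
    | none => exact absurd ((PySem.List.max?_eq_none_iff _ _).mp h) (by simpa using hneT)
    | some m => exact ⟨m, rfl⟩
  obtain ⟨kst, hkstT, hkst⟩ : ∃ kst ∈ T, PySem.List.len kst = m := by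
    have := PySem.List.max?_mem hM
    simpa using List.mem_map.mp this
  have hmLN : m = ((kst.length : Nat) : Int) := by rw [← hkst]; simp [PySem.List.len]
  have hLNle : ∀ k ∈ T, k.length ≤ kst.length := by
    intro k hk
    have h1 := PySem.List.max?_isMax hM (PySem.List.len k) (List.mem_map_of_mem hk)
    rw [hmLN] at h1
    have : (k.length : Int) ≤ (kst.length : Int) := by simpa [PySem.List.len] using h1
    exact_mod_cast this
  rw [hM]
  simp only [Option.getD_some]
  rw [hmLN]
  set score := fun k : List Int =>
    (List.map
        (fun p =>
          PySem.List.pyGetD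
            (List.map
              (fun p => ((List.countP (fun k => decide (p < PySem.List.len k) && PySem.List.pyGetD k p 0 == 1) T : Nat) : Int))
              (PySem.List.pyRange 0 ((kst.length : Nat) : Int)))
            p 0)
        (List.filter (fun p => PySem.List.pyGetD k p 0 == 1) (PySem.List.pyRange 0 (PySem.List.len k)))).sum with hscore
  -- per-key values agree
  have hval : ∀ k ∈ T, R2.getD k 0 = score k := by
    intro k hk
    rw [hconv, getD_outer_fold, getD_insert_zero_fold, if_pos hk]
    have h1 : (fun x : List Int => k == x) = (fun x : List Int => x == k) := by
      funext x
      exact Bool.beq_comm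
    have hfilt : T.filter (fun x => k == x) = [k] := by
      rw [h1, List.filter_beq, List.count_eq_one_of_mem hnd hk]
      rfl
    rw [hfilt]
    simp only [List.map_cons, List.map_nil, List.sum_cons, List.sum_nil, add_zero, zero_add]
    rw [hscore]
    exact M_eq_score T kst.length k (hLNle k hk)
  -- keys of the result dicts
  have hkeys1 : R1.keys = T := by
    rw [hR1, PySem.Dict.keys_foldl_insert T (fun _ _ => (0 : Int)) PySem.Dict.empty]
    simp only [PySem.Dict.keys_empty]
    exact PySem.Set.ofList_eq_self_of_nodup T hnd
  have hkeys2 : R2.keys = T := by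
    rw [hconv, keys_outer_fold T T R1 (fun x hx => by rw [hkeys1]; exact hx)]
    exact hkeys1
  have hvals : R2.values = T.map score := by
    rw [PySem.Dict.values_eq_map_keys R2 (by rw [hkeys2]; exact hnd) 0, hkeys2]
    exact List.map_congr_left hval
  -- the slice bound from Dom
  have hG : ∀ k : List Int, PySem.Dict.getD { items := d } k 0 < 99999999999999999999999999 := by
    intro k
    rw [PySem.Dict.getD_eq_get?_getD]
    cases hq : PySem.Dict.get? { items := d } k with
    | none => simp
    | some v =>
      simp only [Option.getD_some]
      have hmem : (k, v) ∈ d := PySem.Dict.mem_items_of_get?_eq_some { items := d } hq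
      unfold Dom_find_most_unique at hDom
      rw [List.all_eq_true] at hDom
      have := hDom _ hmem
      simp only [Bool.and_eq_true, pvDomInt, decide_eq_true_eq] at this
      omega
  -- the minimum of the match counts
  obtain ⟨lm, hlm⟩ : ∃ lm, PySem.List.min? (T.map score) (fun v => v) = some lm := by
    cases h : PySem.List.min? (T.map score) (fun v => v) with
    | none => exact absurd (by simpa using (PySem.List.min?_eq_none_iff _ _).mp h) hneT
    | some lm => exact ⟨lm, rfl⟩
  obtain ⟨k1, hk1T, hk1s⟩ : ∃ k1 ∈ T, score k1 = lm := by
    have := PySem.List.min?_mem hlm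
    simpa using List.mem_map.mp this
  have hmin : ∀ k ∈ T, lm ≤ score k := by
    intro k hk
    exact PySem.List.min?_isMin hlm (score k) (List.mem_map_of_mem hk)
  rw [hvals, hlm]
  simp only [Option.getD_some]
  rw [hkeys2]
  show (List.foldl
      (fun ls i => if R2.getD i 0 = lm ∧ PySem.Dict.getD { items := d } i 0 < ls.2 then (i, PySem.Dict.getD { items := d } i 0) else ls)
      (([] : List Int), (99999999999999999999999999 : Int)) T).1
    = (PySem.List.min2? T score (fun k => PySem.Dict.getD { items := d } k 0)).getD []
  -- replace the dict lookup by score in the selection loop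
  have hbody : List.foldl
      (fun ls i => if R2.getD i 0 = lm ∧ PySem.Dict.getD { items := d } i 0 < ls.2 then (i, PySem.Dict.getD { items := d } i 0) else ls)
      ([], 99999999999999999999999999) T
      = List.foldl
      (fun ls i => if score i = lm ∧ PySem.Dict.getD { items := d } i 0 < ls.2 then (i, PySem.Dict.getD { items := d } i 0) else ls)
      ([], 99999999999999999999999999) T := by
    apply PySem.List.foldl_congr_mem
    intro acc x hx
    rw [hval x hx]
  rw [hbody]
  obtain ⟨k0, rest, hTc⟩ := List.exists_cons_of_ne_nil hneT
  rw [hTc, List.foldl_cons]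
  rw [min2?_eq_foldl_selStepB, List.foldl_cons, selStepB_none]
  show (List.foldl
      (fun ls i => if score i = lm ∧ PySem.Dict.getD { items := d } i 0 < ls.2 then (i, PySem.Dict.getD { items := d } i 0) else ls)
      (if score k0 = lm ∧ PySem.Dict.getD { items := d } k0 0 < (99999999999999999999999999 : Int) then (k0, PySem.Dict.getD { items := d } k0 0) else (([] : List Int), (99999999999999999999999999 : Int)))
      rest).1
    = (List.foldl (selStepB score (fun k => PySem.Dict.getD { items := d } k 0)) (some k0) rest).getD []
  have hm0 : lm ≤ score k0 := hmin k0 (by rw [hTc]; exact List.mem_cons_self ..)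
  obtain ⟨kb, hB, hble, hI1, hI2⟩ := sel_fold score (fun k => PySem.Dict.getD { items := d } k 0) lm
      99999999999999999999999999 rest
      (fun x hx => ⟨hmin x (by rw [hTc]; exact List.mem_cons_of_mem _ hx), hG x⟩)
      (if score k0 = lm ∧ PySem.Dict.getD { items := d } k0 0 < (99999999999999999999999999 : Int) then (k0, PySem.Dict.getD { items := d } k0 0) else (([] : List Int), (99999999999999999999999999 : Int)))
      k0 hm0
      (fun h => by rw [if_pos ⟨h, hG k0⟩])
      (fun h => by rw [if_neg (by rintro ⟨h1, -⟩; omega)])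
  have hkb : score kb = lm := by
    obtain ⟨hle0, hleR⟩ := sel_fold_min score (fun k => PySem.Dict.getD { items := d } k 0) rest k0 kb hB
    have hub : score kb ≤ lm := by
      rw [hTc] at hk1T
      rcases List.mem_cons.mp hk1T with rfl | h
      · rw [← hk1s]; exact hle0
      · rw [← hk1s]; exact hleR k1 h
    exact le_antisymm hub hble
  rw [hI1 hkb, hB]
  rfl
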